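-- pv_equiv track=rewrite | github.com/AndresAp01/Taller_de_Programacion | Tareas/Tareas Intro/tarea_6_Luis_Acunna_intro.py | WhileSD
-- ===== SOURCE A (Python) =====
-- def WhileSD(lista):
--     if type(lista)!=list or len(lista)==0:
--         return "Error"
--     nueva_lista=[]
--     largo=len(lista)
--     i=0
--     while i<largo:
--         base=lista[i]
--         suma=lista[(i+2)%largo]
--         resta=lista[(i+4)%largo]
--         resultado=base+suma-resta
--         nueva_lista.append(resultado)
--         i+=1
--     return nueva_lista
-- ===== SOURCE B (Python) =====
-- def WhileSD(lista):
--     if type(lista) != list or len(lista) == 0: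
--         return "Error"
--     n = len(lista)
--     r2, r4 = 2 % n, 4 % n
--     rot2 = lista[r2:] + lista[:r2]
--     rot4 = lista[r4:] + lista[:r4]
--     return [b + s - r for b, s, r in zip(lista, rot2, rot4)]
-- ===== Notes on version B (the rewrite author's own statement) =====
-- stated objective: alternative
-- what changed: Replaces the while loop with modular indexing on every step by building two rotated copies via slicing (rotation amounts reduced mod n) and combining the three parallel lists in a single zip comprehension.
-- outside the precondition, e.g. on WhileSD([]): A returns 'Error', B returns 'Error'
import Mathlib
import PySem

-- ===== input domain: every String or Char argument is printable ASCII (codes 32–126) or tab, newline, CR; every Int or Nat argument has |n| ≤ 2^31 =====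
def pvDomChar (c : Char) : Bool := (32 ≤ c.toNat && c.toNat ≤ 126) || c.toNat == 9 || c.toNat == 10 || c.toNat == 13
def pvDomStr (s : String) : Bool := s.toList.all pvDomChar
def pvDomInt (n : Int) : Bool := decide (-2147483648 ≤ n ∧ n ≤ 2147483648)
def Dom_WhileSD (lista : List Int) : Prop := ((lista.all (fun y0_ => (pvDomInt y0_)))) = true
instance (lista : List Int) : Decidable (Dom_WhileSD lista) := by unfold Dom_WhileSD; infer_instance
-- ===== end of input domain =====

-- B builds rotated copies by slicing and combines three parallel lists with one zip pass; objective: alternative decomposition.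

-- ===== PORT A =====
-- while loop of A; indices i, (i+2)%largo, (i+4)%largo are in range, so getD is exact for Python's lista[...]
def WhileSDGo (lista : List Int) (largo : Nat) (i : Nat) (acc : List Int) : List Int :=
  if _h : i < largo then
    WhileSDGo lista largo (i + 1)
      (acc ++ [lista.getD i 0 + lista.getD ((i + 2) % largo) 0 - lista.getD ((i + 4) % largo) 0])
  else acc
termination_by largo - i

-- on the empty list Python A returns the string "Error" (not a list of ints); Pre_ excludes it
def WhileSD (lista : List Int) : List Int :=
  if lista.length = 0 then [] else WhileSDGo lista lista.length 0 []

-- ===== PORT B =====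
-- slices lista[r:] / lista[:r] with 0 ≤ r are List.drop / List.take; zip of three lists as nested zip + map
def WhileSD_alt (lista : List Int) : List Int :=
  if lista.length = 0 then [] else
    let n := lista.length
    let r2 := 2 % n
    let r4 := 4 % n
    let rot2 := lista.drop r2 ++ lista.take r2
    let rot4 := lista.drop r4 ++ lista.take r4
    ((lista.zip rot2).zip rot4).map (fun p => p.1.1 + p.1.2 - p.2)

-- ===== PRECONDITION & SPEC =====
-- Pre_ excludes the empty list, on which A returns the string "Error" instead of a list of ints.
def Pre_WhileSD (lista : List Int) : Prop := lista ≠ []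
instance (lista : List Int) : Decidable (Pre_WhileSD lista) := by unfold Pre_WhileSD; infer_instance
def pvWitness_WhileSD : List Int := [1, 2, 3]

def Spec_WhileSD (lista : List Int) (out : List Int) : Prop := out = WhileSD_alt lista
instance (lista : List Int) (out : List Int) : Decidable (Spec_WhileSD lista out) := by unfold Spec_WhileSD; infer_instance

-- ===== CLAIM (what is proved, stated in full; the proofs are below) =====
def Claim_equal_WhileSD : Prop := ∀ (lista : List Int), Dom_WhileSD lista → Pre_WhileSD lista → Spec_WhileSD lista (WhileSD lista)

-- ===== LEMMAS AND PROOFS =====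

def WhileSDf (lista : List Int) (n i : Nat) : Int :=
  lista.getD i 0 + lista.getD ((i + 2) % n) 0 - lista.getD ((i + 4) % n) 0

theorem WhileSDGo_spec (lista : List Int) (n : Nat) :
    ∀ (k i : Nat) (acc : List Int), n - i = k →
      WhileSDGo lista n i acc = acc ++ (List.range k).map (fun j => WhileSDf lista n (i + j)) := by
  intro k
  induction k with
  | zero =>
    intro i acc h
    rw [WhileSDGo]
    have : ¬ i < n := by omega
    simp [this]
  | succ k ih =>
    intro i acc h
    rw [WhileSDGo]
    have hi : i < n := by omega
    simp only [hi, dif_pos]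
    rw [ih (i + 1) _ (by omega)]
    rw [List.range_succ_eq_map]
    simp [List.map_map, WhileSDf, List.append_assoc, Nat.add_assoc, Nat.add_comm 1]

theorem rot_getElem (lista : List Int) (r i : Nat) (hr : r < lista.length)
    (hi : i < lista.length) :
    (lista.drop r ++ lista.take r).getD i 0 = lista.getD ((i + r) % lista.length) 0 := by
  have hd : (lista.drop r).length = lista.length - r := by simp
  have ht : (lista.take r).length = r := by simp; omega
  by_cases h : i < lista.length - r
  · have hm : (i + r) % lista.length = i + r := Nat.mod_eq_of_lt (by omega)
    rw [hm, List.getD_eq_getElem _ _ (by simp [List.length_append]; omega),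
        List.getElem_append_left (by omega), List.getElem_drop,
        List.getD_eq_getElem _ _ (by omega)]
    congr 1
    omega
  · have hm : (i + r) % lista.length = i + r - lista.length := by
      rw [Nat.mod_eq_sub_mod (by omega)]
      exact Nat.mod_eq_of_lt (by omega)
    rw [hm, List.getD_eq_getElem _ _ (by simp [List.length_append]; omega),
        List.getElem_append_right (by omega), List.getElem_take,
        List.getD_eq_getElem _ _ (by omega)]
    congr 1
    omega

theorem zip_form (lista : List Int) (h : lista ≠ []) :
    WhileSD_alt lista = (List.range lista.length).map (fun j => WhileSDf lista lista.length j) := by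
  have hn : lista.length ≠ 0 := by simpa using h
  unfold WhileSD_alt
  simp only [hn, if_false]
  set n := lista.length with hnn
  have hpos : 0 < n := Nat.pos_of_ne_zero hn
  have hlr : ∀ r, (lista.drop r ++ lista.take r).length = n := by
    intro r; simp [List.length_append]; omega
  apply List.ext_getElem
  · simp [hlr, hnn]
  · intro i h1 h2
    have hi : i < n := by simpa [hnn] using h2
    have hz1 : i < (lista.zip (lista.drop (2 % n) ++ lista.take (2 % n))).length := by
      simp [hlr]; omega
    simp only [List.getElem_map, List.getElem_zip, List.getElem_range]
    rw [WhileSDf]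
    have e2 : (lista.drop (2 % n) ++ lista.take (2 % n))[i]'(by rw [hlr]; exact hi)
        = lista.getD ((i + 2) % n) 0 := by
      rw [← List.getD_eq_getElem _ 0, rot_getElem lista (2 % n) i (Nat.mod_lt _ hpos) hi]
      conv_rhs => rw [Nat.add_mod]
      rw [Nat.add_mod, Nat.mod_mod_of_dvd _ dvd_rfl]
    have e4 : (lista.drop (4 % n) ++ lista.take (4 % n))[i]'(by rw [hlr]; exact hi)
        = lista.getD ((i + 4) % n) 0 := by
      rw [← List.getD_eq_getElem _ 0, rot_getElem lista (4 % n) i (Nat.mod_lt _ hpos) hi]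
      conv_rhs => rw [Nat.add_mod]
      rw [Nat.add_mod, Nat.mod_mod_of_dvd _ dvd_rfl]
    rw [e2, e4, List.getD_eq_getElem _ _ hi]

-- ===== VERDICT (by name: the statement is the Claim_ definition above) =====
theorem WhileSD_spec : Claim_equal_WhileSD := by
  intro lista _ hpre
  have hn : lista.length ≠ 0 := by simpa using hpre
  unfold Spec_WhileSD WhileSD
  rw [if_neg hn, WhileSDGo_spec lista lista.length lista.length 0 [] (by omega),
      zip_form lista hpre]
  simp
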